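-- pv_equiv track=rewrite | github.com/GATECH-EIC/ShiftAddNAS | NLP/en-de/sim/ShiftAddNAS_shift_ffn_v1.py | possible_mul
-- ===== SOURCE A (Python) =====
-- def possible_mul(x,l):
--     if len(l) == 1:
--         raw_list = [x*l[0], x*1]
--         clean_list = list(dict.fromkeys(raw_list))
--         return clean_list
--     else:
--         raw_list = possible_mul(x*l[0], l[1:]) + possible_mul(x*1, l[1:])
--         clean_list = list(dict.fromkeys(raw_list))
--         return clean_list
-- ===== SOURCE B (Python) =====
-- def possible_mul(x, l):
--     # Compute the deduped suffix subset-product list once per suffix (one linear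
--     # pass from the back), then scale by x at the end, instead of A's doubled
--     # recursion over both branches.
--     s = list(dict.fromkeys([l[-1], 1]))
--     for v in reversed(l[:-1]):
--         s = list(dict.fromkeys([v * p for p in s] + s))
--     return list(dict.fromkeys([x * p for p in s]))
-- ===== Notes on version B (the rewrite author's own statement) =====
-- stated objective: alternative
-- what changed: A recurses on both branches (include/skip l[0]) giving ~2^n recursive calls with a dedup at every node; B computes the deduped list of suffix subset-products once per suffix in a single backward linear pass and scales by x only once at the end (intended as faster; measured 2.19x at n=16, unconfirmed at larger sizes where the distinct-product count is itself exponential).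
import Mathlib
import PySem

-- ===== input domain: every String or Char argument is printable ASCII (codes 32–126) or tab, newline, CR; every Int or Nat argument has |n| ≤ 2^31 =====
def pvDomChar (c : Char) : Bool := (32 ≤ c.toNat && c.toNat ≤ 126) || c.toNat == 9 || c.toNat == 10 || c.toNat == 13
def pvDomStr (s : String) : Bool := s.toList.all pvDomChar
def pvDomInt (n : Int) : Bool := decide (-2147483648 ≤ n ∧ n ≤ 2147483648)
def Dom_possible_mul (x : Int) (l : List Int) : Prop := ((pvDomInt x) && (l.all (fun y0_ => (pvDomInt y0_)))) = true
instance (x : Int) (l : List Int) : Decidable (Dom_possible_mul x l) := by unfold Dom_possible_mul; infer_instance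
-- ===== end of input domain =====

-- B computes the deduped suffix subset-product list once per suffix (one linear pass from the back)
-- and scales by x once at the end, instead of A's doubled recursion over both branches.

-- ===== PORT A =====
-- literal transliteration of A: len(l)==1 base case, else recurse on both x*l[0] and x*1 over l[1:],
-- dedup (= list(dict.fromkeys(…)), first occurrences) at every node. Python raises IndexError on l=[]
-- (excluded by Pre_); the [] branch here is unreachable under Pre_.
def possible_mul (x : Int) (l : List Int) : List Int :=
  match l with
  | [] => []
  | [a] => PySem.List.dedup [x * a, x * 1]
  | a :: rest => PySem.List.dedup (possible_mul (x * a) rest ++ possible_mul (x * 1) rest)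

-- ===== PORT B =====
-- one loop step of B: s = list(dict.fromkeys([v*p for p in s] + s))
def pmStep (s : List Int) (v : Int) : List Int :=
  PySem.List.dedup (s.map (fun p => v * p) ++ s)

-- transliteration of Source B: s = dedup([l[-1], 1]); for v in reversed(l[:-1]): s = pmStep s v;
-- return dedup([x*p for p in s]). Python raises IndexError on l=[] (excluded by Pre_).
def possible_mul_alt (x : Int) (l : List Int) : List Int :=
  match l.getLast? with
  | none => []
  | some last =>
    let s := (l.dropLast.reverse).foldl pmStep (PySem.List.dedup [last, 1])
    PySem.List.dedup (s.map (fun p => x * p))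

-- ===== PRECONDITION & SPEC =====
-- Pre_ excludes only l = [], on which the Python A raises IndexError (l[0]); B raises IndexError too.
def Pre_possible_mul (x : Int) (l : List Int) : Prop := l ≠ []
instance (x : Int) (l : List Int) : Decidable (Pre_possible_mul x l) := by unfold Pre_possible_mul; infer_instance
def pvWitness_possible_mul : Int × List Int := (3, [2, -1, 2])

def Spec_possible_mul (x : Int) (l : List Int) (out : List Int) : Prop := out = possible_mul_alt x l
instance (x : Int) (l : List Int) (out : List Int) : Decidable (Spec_possible_mul x l out) := by unfold Spec_possible_mul; infer_instance

-- ===== CLAIM (what is proved, stated in full; the proofs are below) =====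
def Claim_equal_possible_mul : Prop := ∀ (x : Int) (l : List Int), Dom_possible_mul x l → Pre_possible_mul x l → Spec_possible_mul x l (possible_mul x l)

-- ===== LEMMAS AND PROOFS =====

-- update ignores duplicates already folded away by ofList, even through a map
theorem pv_update_map_ofList (f : Int → Int) (L s : List Int) :
    PySem.Set.update s ((PySem.Set.ofList L).map f) = PySem.Set.update s (L.map f) := by
  induction L using List.reverseRecOn generalizing s with
  | nil => simp
  | append_singleton L a ih =>
    by_cases h : a ∈ L
    · rw [PySem.Set.ofList_append_singleton, PySem.Set.add_of_mem (by simp [PySem.Set.mem_ofList, h]),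
        ih]
      rw [List.map_append, PySem.Set.update_append]
      simp only [List.map_cons, List.map_nil, PySem.Set.update_cons, PySem.Set.update_nil]
      rw [PySem.Set.add_of_mem]
      simp only [PySem.Set.mem_update]
      right; exact List.mem_map_of_mem h
    · rw [PySem.Set.ofList_append_singleton, PySem.Set.add_of_not_mem (by simp [PySem.Set.mem_ofList, h]),
        List.map_append, List.map_append, PySem.Set.update_append, PySem.Set.update_append, ih]

-- dedup (map f (dedup L)) = dedup (map f L)
theorem pv_dedup_map_dedup (f : Int → Int) (L : List Int) :
    PySem.List.dedup ((PySem.List.dedup L).map f) = PySem.List.dedup (L.map f) := by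
  simp only [PySem.List.dedup_eq_ofList, ← PySem.Set.update_nil_left]
  exact pv_update_map_ofList f L []

-- dedup (dedup A ++ B) = dedup (A ++ B)
theorem pv_dedup_dedup_append (A B : List Int) :
    PySem.List.dedup (PySem.List.dedup A ++ B) = PySem.List.dedup (A ++ B) := by
  simp only [PySem.List.dedup_eq_ofList, PySem.Set.ofList_append, PySem.Set.ofList_ofList]

-- dedup (A ++ dedup B) = dedup (A ++ B)
theorem pv_dedup_append_dedup (A B : List Int) :
    PySem.List.dedup (A ++ PySem.List.dedup B) = PySem.List.dedup (A ++ B) := by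
  simp only [PySem.List.dedup_eq_ofList, PySem.Set.ofList_append]
  have := pv_update_map_ofList id B (PySem.Set.ofList A)
  simpa using this

-- B's loop state for a nonempty list a :: rest, peeled one element at a time
theorem pv_fold_cons (a : Int) (rest : List Int) (h : rest ≠ []) :
    ((a :: rest).dropLast.reverse).foldl pmStep (PySem.List.dedup [(a :: rest).getLast (by simp), 1])
      = pmStep ((rest.dropLast.reverse).foldl pmStep (PySem.List.dedup [rest.getLast h, 1])) a := by
  rw [List.dropLast_cons_of_ne_nil h, List.reverse_cons, List.foldl_append]
  simp [List.getLast_cons h]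

-- main invariant: A's result is dedup of x-scaled B loop state
theorem pv_main (l : List Int) (h : l ≠ []) (x : Int) :
    possible_mul x l =
      PySem.List.dedup
        (((l.dropLast.reverse).foldl pmStep (PySem.List.dedup [l.getLast h, 1])).map
          (fun p => x * p)) := by
  induction l generalizing x with
  | nil => exact absurd rfl h
  | cons a rest ih =>
    cases rest with
    | nil =>
      show PySem.List.dedup [x * a, x * 1]
        = PySem.List.dedup (List.map (fun p => x * p)
            (List.foldl pmStep (PySem.List.dedup [[a].getLast h, 1]) [a].dropLast.reverse))
      simp only [List.getLast_singleton, List.dropLast, List.reverse_nil, List.foldl_nil]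
      rw [pv_dedup_map_dedup]
      simp
    | cons b t =>
      have hr : (b :: t) ≠ [] := by simp
      rw [pv_fold_cons a (b :: t) hr]
      set S := (((b :: t).dropLast.reverse).foldl pmStep
        (PySem.List.dedup [(b :: t).getLast hr, 1])) with hS
      show PySem.List.dedup (possible_mul (x * a) (b :: t) ++ possible_mul (x * 1) (b :: t))
        = PySem.List.dedup ((pmStep S a).map (fun p => x * p))
      rw [ih hr (x * a), ih hr (x * 1)]
      rw [pv_dedup_dedup_append, pv_dedup_append_dedup]
      unfold pmStep
      rw [pv_dedup_map_dedup, List.map_append, List.map_map]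
      congr 2
      · apply List.map_congr_left; intro p _; simp [mul_assoc]
      · apply List.map_congr_left; intro p _; simp

-- ===== VERDICT (by name: the statement is the Claim_ definition above) =====
theorem possible_mul_spec : Claim_equal_possible_mul := by
  intro x l _ hpre
  unfold Spec_possible_mul possible_mul_alt
  rw [List.getLast?_eq_some_getLast hpre]
  exact pv_main l hpre x
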